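-- pv_equiv track=rewrite | github.com/GermanYakimov/Netology-homeworks | Vk_Api-master/main.py | pairs_create
-- ===== SOURCE A (Python) =====
-- def pairs_create(friends):
--     pairs = dict()
--
--     for num, friend in enumerate(friends):
--         for friend_tmp in friends:
--             if (friend_tmp != friend) and (friend + '-' + friend_tmp not in pairs)\
--                 and (friend_tmp + '-' + friend not in pairs):
--                 pairs[friend + '-' + friend_tmp] = str(friends[friend]) + '-' + str(friends[friend_tmp])
--
--     return pairs
-- ===== SOURCE B (Python) =====
-- def pairs_create(friends):
--     # One pass over the key list collecting the flat triangular pair list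
--     # (each key with every later key); the dict is built once at the end,
--     # so no dict is consulted or mutated during the traversal.
--     keys = list(friends)
--     rows = []
--     for i, head in enumerate(keys):
--         rows += [(head + '-' + b, str(friends[head]) + '-' + str(friends[b]))
--                  for b in keys[i + 1:]]
--     return dict(rows)
-- ===== Notes on version B (the rewrite author's own statement) =====
-- stated objective: faster
-- what changed: B replaces A's two nested dict-inserting loops with their three-way membership-dedup test by a single pass that collects the flat triangular pair list (each key with every later key) and constructs the dict once from that list at the end; no dict is consulted or mutated during the traversal.
import Mathlib
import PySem

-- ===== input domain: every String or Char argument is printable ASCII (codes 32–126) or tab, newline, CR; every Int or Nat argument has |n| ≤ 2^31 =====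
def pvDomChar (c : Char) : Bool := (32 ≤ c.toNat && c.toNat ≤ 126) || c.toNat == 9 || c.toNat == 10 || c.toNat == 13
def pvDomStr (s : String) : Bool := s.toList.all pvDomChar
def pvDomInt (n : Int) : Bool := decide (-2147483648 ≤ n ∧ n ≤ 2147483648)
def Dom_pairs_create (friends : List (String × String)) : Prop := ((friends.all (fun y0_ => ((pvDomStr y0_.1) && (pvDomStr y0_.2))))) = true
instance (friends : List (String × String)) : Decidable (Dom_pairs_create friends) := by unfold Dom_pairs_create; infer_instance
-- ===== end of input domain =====

-- B replaces A's two nested dict-inserting loops and their three-way membership-dedup test by a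
-- single pass collecting the flat triangular pair list, turned into a dict once at the end;
-- equality is about the returned dict only.

-- ===== PORT A =====
def pairs_create (friends : List (String × String)) : List (String × String) :=
  let fd : PySem.Dict String String := PySem.Dict.mk friends
  let ks := fd.keys
  ((PySem.List.enumerate ks 0).foldl (fun pairs nf =>
      ks.foldl (fun pairs ft =>
        if ft != nf.2 && !(pairs.contains (nf.2 ++ "-" ++ ft)) && !(pairs.contains (ft ++ "-" ++ nf.2))
        then pairs.insert (nf.2 ++ "-" ++ ft) (fd.getD nf.2 "" ++ "-" ++ fd.getD ft "")
        else pairs) pairs)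
    (PySem.Dict.empty)).items

-- ===== PORT B =====
def pairs_create_alt (friends : List (String × String)) : List (String × String) :=
  let fd : PySem.Dict String String := PySem.Dict.mk friends
  let ks := fd.keys
  let rows := (PySem.List.enumerate ks 0).foldl (fun rows ih =>
      rows ++ (PySem.List.slice ks (some (ih.1 + 1)) none).map
        (fun b => (ih.2 ++ "-" ++ b, fd.getD ih.2 "" ++ "-" ++ fd.getD b ""))) []
  (PySem.Dict.ofList rows).items

-- ===== PRECONDITION & SPEC =====
-- no two DIFFERENT ordered key pairs taken along the list ([a,b] a sublist = a before b) produce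
-- colliding '-'-joined strings, in either orientation
def pvCross (ks : List String) : Prop :=
  ∀ a ∈ ks, ∀ b ∈ ks, ∀ c ∈ ks, ∀ d ∈ ks,
    [a, b].Sublist ks → [c, d].Sublist ks → (a, b) ≠ (c, d) →
      a ++ "-" ++ b ≠ c ++ "-" ++ d ∧ a ++ "-" ++ b ≠ d ++ "-" ++ c

-- Pre_ excludes assoc lists with duplicate keys (not representable as the Python dict input) and
-- key sets where the '-'-joined keys of two DIFFERENT key pairs collide: on such collisions A's
-- membership-dedup skips the later pair (keeping the first value) while B overwrites, an
-- unspecified corner where either value is defensible.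
def Pre_pairs_create (friends : List (String × String)) : Prop :=
  (friends.map Prod.fst).Nodup ∧ pvCross (friends.map Prod.fst)
instance (friends : List (String × String)) : Decidable (Pre_pairs_create friends) := by
  unfold Pre_pairs_create pvCross; infer_instance

def pvWitness_pairs_create : (List (String × String)) := [("x", "1"), ("y", "2"), ("z", "3")]

def Spec_pairs_create (friends : List (String × String)) (out : List (String × String)) : Prop := out = pairs_create_alt friends
instance (friends : List (String × String)) (out : List (String × String)) : Decidable (Spec_pairs_create friends out) := by unfold Spec_pairs_create; infer_instance

-- ===== CLAIM (what is proved, stated in full; the proofs are below) =====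
def Claim_equal_pairs_create : Prop := ∀ (friends : List (String × String)), Dom_pairs_create friends → Pre_pairs_create friends → Spec_pairs_create friends (pairs_create friends)

-- ===== LEMMAS AND PROOFS =====

-- the triangular row list both programs produce: head with every later key, then the tail
def pvRows (v : String → String) : List String → List (String × String)
  | [] => []
  | head :: rest => rest.map (fun b => (head ++ "-" ++ b, v head ++ "-" ++ v b)) ++ pvRows v rest

-- the unordered key pairs, in the triangular order
def pvPairs : List String → List (String × String)
  | [] => []
  | a :: r => r.map (fun b => (a, b)) ++ pvPairs r

-- the '-'-joined forward key of every pair, in the same order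
def pvFwdK : List String → List String
  | [] => []
  | a :: r => r.map (fun b => a ++ "-" ++ b) ++ pvFwdK r

-- within one head's row: the reverse key of a pair never equals the forward key of an EARLIER pair
def pvC1 (a : String) : List String → Bool
  | [] => true
  | b :: r => r.all (fun x => x ++ "-" ++ a != a ++ "-" ++ b) && pvC1 a r

-- globally: the reverse key of a pair never equals the forward key of an earlier, different pair
def pvRevOK : List String → Bool
  | [] => true
  | a :: r => pvC1 a r
      && (pvPairs r).all (fun p => r.all (fun b => p.2 ++ "-" ++ p.1 != a ++ "-" ++ b))
      && pvRevOK r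

-- forward keys already inserted after A's outer loop has processed `done` (remaining keys `rest`)
def pvFK : List String → List String → List String
  | [], _ => []
  | d :: ds, rest => (ds ++ rest).map (fun b => d ++ "-" ++ b) ++ pvFK ds rest

def pvStepA (v : String → String) (a : String) (pairs : PySem.Dict String String) (ft : String) :
    PySem.Dict String String :=
  if ft != a && !(pairs.contains (a ++ "-" ++ ft)) && !(pairs.contains (ft ++ "-" ++ a))
  then pairs.insert (a ++ "-" ++ ft) (v a ++ "-" ++ v ft)
  else pairs

theorem pv_dash_cancel {a b b' : String} (h : a ++ "-" ++ b = a ++ "-" ++ b') : b = b' := by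
  have h2 := congrArg String.toList h
  simp at h2
  exact String.ext h2

-- ----- deriving the structural invariants from the closed-form pvCross -----

theorem pvCross_tail (a : String) (r : List String) (h : pvCross (a :: r)) : pvCross r := by
  intro x hx y hy z hz w hw hs1 hs2 hne
  exact h x (by simp [hx]) y (by simp [hy]) z (by simp [hz]) w (by simp [hw])
    (hs1.trans (List.sublist_cons_self a r)) (hs2.trans (List.sublist_cons_self a r)) hne

theorem pv_mem_pvFwdK (ks : List String) (x : String) (hx : x ∈ pvFwdK ks) :
    ∃ c d, c ∈ ks ∧ d ∈ ks ∧ [c, d].Sublist ks ∧ x = c ++ "-" ++ d := by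
  induction ks with
  | nil => simp [pvFwdK] at hx
  | cons a r ih =>
    rcases List.mem_append.mp hx with h1 | h2
    · obtain ⟨b, hb, rfl⟩ := List.mem_map.mp h1
      exact ⟨a, b, by simp, by simp [hb],
        List.cons_sublist_cons.mpr (List.singleton_sublist.mpr hb), rfl⟩
    · obtain ⟨c, d, hc, hd, hs, rfl⟩ := ih h2
      exact ⟨c, d, by simp [hc], by simp [hd], hs.trans (List.sublist_cons_self a r), rfl⟩

theorem pv_mem_pvPairs (ks : List String) (c d : String) (h : (c, d) ∈ pvPairs ks) :
    c ∈ ks ∧ d ∈ ks ∧ [c, d].Sublist ks := by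
  induction ks with
  | nil => simp [pvPairs] at h
  | cons a r ih =>
    rcases List.mem_append.mp h with h1 | h2
    · obtain ⟨b, hb, hq⟩ := List.mem_map.mp h1
      obtain ⟨rfl, rfl⟩ := Prod.mk.inj hq
      exact ⟨by simp, by simp [hb], List.cons_sublist_cons.mpr (List.singleton_sublist.mpr hb)⟩
    · obtain ⟨hc, hd, hs⟩ := ih h2
      exact ⟨by simp [hc], by simp [hd], hs.trans (List.sublist_cons_self a r)⟩

theorem pv_fwd_nodup (ks : List String) (hnd : ks.Nodup) (hc : pvCross ks) :
    (pvFwdK ks).Nodup := by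
  induction ks with
  | nil => simp [pvFwdK]
  | cons a r ih =>
    have htl : r.Nodup := (List.nodup_cons.mp hnd).2
    have hanotin : a ∉ r := (List.nodup_cons.mp hnd).1
    show (r.map (fun b => a ++ "-" ++ b) ++ pvFwdK r).Nodup
    rw [List.nodup_append]
    refine ⟨htl.map (fun _ _ h => pv_dash_cancel h), ih htl (pvCross_tail a r hc), ?_⟩
    intro x hx y hy
    obtain ⟨b, hb, rfl⟩ := List.mem_map.mp hx
    obtain ⟨c, d, hcm, hdm, hs, rfl⟩ := pv_mem_pvFwdK r y hy
    have hac : a ≠ c := fun h => hanotin (h ▸ hcm)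
    exact (hc a (by simp) b (by simp [hb]) c (by simp [hcm]) d (by simp [hdm])
      (List.cons_sublist_cons.mpr (List.singleton_sublist.mpr hb))
      (hs.trans (List.sublist_cons_self a r))
      (by simp [Prod.ext_iff, hac])).1

theorem pv_c1_of (a : String) (r : List String) (hnd : r.Nodup)
    (H : ∀ b ∈ r, ∀ x ∈ r, b ≠ x → x ++ "-" ++ a ≠ a ++ "-" ++ b) :
    pvC1 a r = true := by
  induction r with
  | nil => rfl
  | cons b rr ih =>
    have hrr : rr.Nodup := (List.nodup_cons.mp hnd).2
    have hbni : b ∉ rr := (List.nodup_cons.mp hnd).1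
    simp only [pvC1, Bool.and_eq_true, List.all_eq_true, bne_iff_ne]
    refine ⟨fun x hx => H b (by simp) x (by simp [hx]) (fun h => hbni (h ▸ hx)), ?_⟩
    exact ih hrr (fun u hu x hx hux => H u (by simp [hu]) x (by simp [hx]) hux)

theorem pv_rev_ok (ks : List String) (hnd : ks.Nodup) (hc : pvCross ks) :
    pvRevOK ks = true := by
  induction ks with
  | nil => rfl
  | cons a r ih =>
    have htl : r.Nodup := (List.nodup_cons.mp hnd).2
    have hanotin : a ∉ r := (List.nodup_cons.mp hnd).1
    simp only [pvRevOK, Bool.and_eq_true]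
    refine ⟨⟨?_, ?_⟩, ih htl (pvCross_tail a r hc)⟩
    · apply pv_c1_of a r htl
      intro b hb x hx hbx
      exact fun h => ((hc a (by simp) b (by simp [hb]) a (by simp) x (by simp [hx])
        (List.cons_sublist_cons.mpr (List.singleton_sublist.mpr hb))
        (List.cons_sublist_cons.mpr (List.singleton_sublist.mpr hx))
        (by simp [Prod.ext_iff, hbx])).2) h.symm
    · simp only [List.all_eq_true, bne_iff_ne]
      rintro ⟨c, d⟩ hp b hb
      obtain ⟨hcm, hdm, hs⟩ := pv_mem_pvPairs r c d hp
      have hac : a ≠ c := fun h => hanotin (h ▸ hcm)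
      exact fun h => ((hc a (by simp) b (by simp [hb]) c (by simp [hcm]) d (by simp [hdm])
        (List.cons_sublist_cons.mpr (List.singleton_sublist.mpr hb))
        (hs.trans (List.sublist_cons_self a r))
        (by simp [Prod.ext_iff, hac])).2) h.symm

-- ----- structural facts reused by the A-side invariant -----

theorem pvFK_snoc (done tl : List String) (a : String) :
    pvFK (done ++ [a]) tl = pvFK done (a :: tl) ++ tl.map (fun b => a ++ "-" ++ b) := by
  induction done with
  | nil => simp [pvFK]
  | cons d ds ih =>
    simp only [List.cons_append, pvFK, ih, List.append_assoc, List.nil_append]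

theorem pv_mem_FK (done rest : List String) (x y : String) (hx : x ∈ done) (hy : y ∈ rest) :
    x ++ "-" ++ y ∈ pvFK done rest := by
  induction done with
  | nil => simp at hx
  | cons d ds ih =>
    simp only [pvFK, List.mem_append]
    rcases List.mem_cons.mp hx with rfl | hx2
    · left
      exact List.mem_map_of_mem (List.mem_append_right _ hy)
    · exact Or.inr (ih hx2)

theorem pvFwdK_append (done rest : List String) :
    pvFwdK (done ++ rest) = pvFK done rest ++ pvFwdK rest := by
  induction done with
  | nil => simp [pvFK]
  | cons d ds ih => simp [pvFwdK, pvFK, ih, List.append_assoc]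

theorem pvPairs_mono (done rest : List String) (p : String × String)
    (h : p ∈ pvPairs rest) : p ∈ pvPairs (done ++ rest) := by
  induction done with
  | nil => simpa using h
  | cons d ds ih => exact List.mem_append_right _ ih

theorem pvRevOK_suffix (done rest : List String) (h : pvRevOK (done ++ rest) = true) :
    pvRevOK rest = true := by
  induction done with
  | nil => simpa using h
  | cons d ds ih =>
    simp only [List.cons_append, pvRevOK, Bool.and_eq_true] at h
    exact ih h.2

theorem pvRevOK_cross (done rest : List String) (h : pvRevOK (done ++ rest) = true)
    (a b : String) (hp : (a, b) ∈ pvPairs rest) :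
    ∀ x ∈ pvFK done rest, b ++ "-" ++ a ≠ x := by
  induction done with
  | nil => intro x hx; simp [pvFK] at hx
  | cons d ds ih =>
    simp only [List.cons_append, pvRevOK, Bool.and_eq_true] at h
    obtain ⟨⟨-, hcl2⟩, hrec⟩ := h
    intro x hx
    rcases List.mem_append.mp hx with hx1 | hx2
    · obtain ⟨e, he, rfl⟩ := List.mem_map.mp hx1
      simp only [List.all_eq_true, bne_iff_ne] at hcl2
      exact hcl2 (a, b) (pvPairs_mono ds rest _ hp) e he
    · exact ih hrec x hx2

theorem pvC1_of_revOK (a : String) (tl : List String) (h : pvRevOK (a :: tl) = true) :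
    pvC1 a tl = true := by
  simp only [pvRevOK, Bool.and_eq_true] at h
  exact h.1.1

theorem pv_foldl_enum_snd {α β : Type} (g : β → α → β) :
    ∀ (xs : List α) (s : Int) (acc : β),
    (PySem.List.enumerate xs s).foldl (fun acc p => g acc p.2) acc = xs.foldl g acc := by
  intro xs
  induction xs with
  | nil => intro s acc; simp [PySem.List.enumerate_nil]
  | cons x xs ih => intro s acc; simp [PySem.List.enumerate_cons, ih]

-- ----- A's loop reaches pvRows -----

theorem pv_innerA_done (v : String → String) (a : String) :
    ∀ (ds : List String) (d : PySem.Dict String String),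
    (∀ ft ∈ ds, d.contains (ft ++ "-" ++ a) = true) →
    ds.foldl (pvStepA v a) d = d := by
  intro ds
  induction ds with
  | nil => intro d _; rfl
  | cons ft ds ih =>
    intro d h
    have hft := h ft (by simp)
    have hs : pvStepA v a d ft = d := by
      simp [pvStepA, hft]
    rw [List.foldl_cons, hs]
    exact ih d (fun x hx => h x (by simp [hx]))

theorem pv_innerA_fresh (v : String → String) (a : String) :
    ∀ (bs : List String) (d : PySem.Dict String String),
    bs.Nodup →
    (∀ b ∈ bs, a ≠ b) →
    (∀ b ∈ bs, d.contains (a ++ "-" ++ b) = false) →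
    (∀ b ∈ bs, d.contains (b ++ "-" ++ a) = false) →
    pvC1 a bs = true →
    (bs.foldl (pvStepA v a) d).items
      = d.items ++ bs.map (fun b => (a ++ "-" ++ b, v a ++ "-" ++ v b)) := by
  intro bs
  induction bs with
  | nil => intro d _ _ _ _ _; simp
  | cons b bs ih =>
    intro d hnd hne hc1 hc2 hC1
    simp only [pvC1, Bool.and_eq_true, List.all_eq_true] at hC1
    obtain ⟨hcross, hC1rec⟩ := hC1
    have hab : d.contains (a ++ "-" ++ b) = false := hc1 b (by simp)
    have hba : d.contains (b ++ "-" ++ a) = false := hc2 b (by simp)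
    have hneb : a ≠ b := hne b (by simp)
    have hstep : pvStepA v a d b = d.insert (a ++ "-" ++ b) (v a ++ "-" ++ v b) := by
      simp [pvStepA, hab, hba, bne_iff_ne, Ne.symm hneb]
    rw [List.foldl_cons, hstep]
    have hnotmem : b ∉ bs := (List.nodup_cons.mp hnd).1
    have hrec := ih (d.insert (a ++ "-" ++ b) (v a ++ "-" ++ v b))
      (List.nodup_cons.mp hnd).2
      (fun x hx => hne x (by simp [hx]))
      (fun x hx => by
        rw [PySem.Dict.contains_insert]
        have hx1 : (a ++ "-" ++ x == a ++ "-" ++ b) = false := by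
          apply beq_false_of_ne
          intro hq
          exact hnotmem ((pv_dash_cancel hq) ▸ hx)
        rw [hx1, Bool.false_or]
        exact hc1 x (by simp [hx]))
      (fun x hx => by
        rw [PySem.Dict.contains_insert]
        have hx1 : (x ++ "-" ++ a == a ++ "-" ++ b) = false := by
          apply beq_false_of_ne
          exact bne_iff_ne.mp (hcross x hx)
        rw [hx1, Bool.false_or]
        exact hc2 x (by simp [hx]))
      hC1rec
    rw [hrec, PySem.Dict.items_insert_of_not_contains _ _ hab]
    simp

theorem pv_outerA (v : String → String) :
    ∀ (rest done ks : List String) (d : PySem.Dict String String),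
    ks = done ++ rest → ks.Nodup → ((pvFwdK ks).Nodup ∧ pvRevOK ks = true) → d.keys = pvFK done rest →
    (rest.foldl (fun pairs a => ks.foldl (pvStepA v a) pairs) d).items
      = d.items ++ pvRows v rest := by
  intro rest
  induction rest with
  | nil => intro done ks d hks hnd hpk hkeys; simp [pvRows]
  | cons a tl ih =>
    intro done ks d hks hnd hpk hkeys
    subst hks
    have hpkAll := hpk
    have hnd2 : (a :: tl).Nodup := (List.nodup_append.mp hnd).2.1
    have hanotin : a ∉ tl := (List.nodup_cons.mp hnd2).1
    have htl : tl.Nodup := (List.nodup_cons.mp hnd2).2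
    obtain ⟨hfwd, hrev⟩ := hpk
    have hfwd2 := hfwd
    rw [pvFwdK_append, List.nodup_append] at hfwd2
    obtain ⟨-, -, hdisj⟩ := hfwd2
    have hcontFwd : ∀ b ∈ tl, d.contains (a ++ "-" ++ b) = false := by
      intro b hb
      cases hcc : d.contains (a ++ "-" ++ b) with
      | false => rfl
      | true =>
        exfalso
        have hk : a ++ "-" ++ b ∈ d.keys := (PySem.Dict.contains_iff_mem_keys d _).mp hcc
        rw [hkeys] at hk
        refine hdisj _ hk _ ?_ rfl
        exact List.mem_append_left _ (List.mem_map_of_mem hb)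
    have hcontRev : ∀ b ∈ tl, d.contains (b ++ "-" ++ a) = false := by
      intro b hb
      cases hcc : d.contains (b ++ "-" ++ a) with
      | false => rfl
      | true =>
        exfalso
        have hk : b ++ "-" ++ a ∈ d.keys := (PySem.Dict.contains_iff_mem_keys d _).mp hcc
        rw [hkeys] at hk
        exact pvRevOK_cross done (a :: tl) hrev a b
          (List.mem_append_left _ (List.mem_map_of_mem hb)) _ hk rfl
    have h1 : done.foldl (pvStepA v a) d = d := by
      apply pv_innerA_done
      intro ft hft
      exact (PySem.Dict.contains_iff_mem_keys d _).mpr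
        (hkeys ▸ pv_mem_FK done (a :: tl) ft a hft (by simp))
    have h2 : pvStepA v a d a = d := by simp [pvStepA]
    have hfa : (done ++ a :: tl).foldl (pvStepA v a) d = tl.foldl (pvStepA v a) d := by
      rw [List.foldl_append, h1, List.foldl_cons, h2]
    have hfresh := pv_innerA_fresh v a tl d htl
      (fun b hb => fun hq => hanotin (hq ▸ hb))
      hcontFwd
      hcontRev
      (pvC1_of_revOK a tl (pvRevOK_suffix done (a :: tl) hrev))
    have hkeys2 : (tl.foldl (pvStepA v a) d).keys = pvFK (done ++ [a]) tl := by
      show (tl.foldl (pvStepA v a) d).items.map (·.1) = _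
      rw [hfresh, List.map_append,
        show List.map (fun x => x.1) d.items = pvFK done (a :: tl) from hkeys, pvFK_snoc]
      simp
    have hih := ih (done ++ [a]) (done ++ a :: tl) (tl.foldl (pvStepA v a) d)
      (by rw [List.append_cons]) hnd hpkAll hkeys2
    rw [List.foldl_cons, hfa, hih, hfresh]
    simp [pvRows, List.append_assoc]

-- ----- B's pass reaches pvRows -----

theorem pv_foldB (v : String → String) :
    ∀ (rest done ks : List String) (acc : List (String × String)),
    ks = done ++ rest →
    ((PySem.List.enumerate rest ((done.length : Nat) : Int)).foldl (fun rows ih =>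
        rows ++ (PySem.List.slice ks (some (ih.1 + 1)) none).map
          (fun b => (ih.2 ++ "-" ++ b, v ih.2 ++ "-" ++ v b))) acc)
      = acc ++ pvRows v rest := by
  intro rest
  induction rest with
  | nil =>
    intro done ks acc hks
    simp [pvRows, PySem.List.enumerate_nil]
  | cons a tl ih =>
    intro done ks acc hks
    subst hks
    have hd : List.drop (done.length + 1) (done ++ a :: tl) = tl := by
      simp
    have hslice : PySem.List.slice (done ++ a :: tl) (some ((done.length : Int) + 1)) none = tl := by
      rw [PySem.List.slice_from (xs := done ++ a :: tl) (a := (done.length : Int) + 1) (by omega)]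
      have ht : ((done.length : Int) + 1).toNat = done.length + 1 := by omega
      rw [ht]
      exact hd
    rw [PySem.List.enumerate_cons, List.foldl_cons]
    rw [show (((done.length : Int), a)).2 = a from rfl,
        show (((done.length : Int), a)).1 = (done.length : Int) from rfl, hslice]
    have hlen : ((done.length : Int) + 1) = (((done ++ [a]).length : Nat) : Int) := by simp
    rw [hlen, ih (done ++ [a]) (done ++ a :: tl) _ (by rw [List.append_cons])]
    simp [pvRows, List.append_assoc]

-- keys of the triangular list are exactly the forward keys
theorem pvRows_keys (v : String → String) (ks : List String) :
    (pvRows v ks).map Prod.fst = pvFwdK ks := by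
  induction ks with
  | nil => rfl
  | cons a r ih => simp [pvRows, pvFwdK, ih]

-- dict(l) with pairwise-distinct keys has exactly l as its items
theorem pv_ofList_items_of_nodup (l : List (String × String)) (h : (l.map Prod.fst).Nodup) :
    (PySem.Dict.ofList l).items = l := by
  suffices hgen : ∀ (l : List (String × String)) (d : PySem.Dict String String),
      (l.map Prod.fst).Nodup → (∀ p ∈ l, d.contains p.1 = false) →
      (d.update l).items = d.items ++ l by
    simpa using hgen l PySem.Dict.empty h (by intro p _; simp)
  intro l
  induction l with
  | nil => intro d _ _; simp [PySem.Dict.update]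
  | cons p r ih =>
    intro d hnd hfresh
    have hpc : d.contains p.1 = false := hfresh p (by simp)
    have hstep : (d.update (p :: r)) = (d.insert p.1 p.2).update r := by
      cases p; rfl
    rw [hstep, ih (d.insert p.1 p.2) (List.nodup_cons.mp (by simpa using hnd)).2
      (fun q hq => by
        rw [PySem.Dict.contains_insert]
        have hq1 : (q.1 == p.1) = false := by
          apply beq_false_of_ne
          intro he
          exact (List.nodup_cons.mp (by simpa using hnd)).1
            (he ▸ List.mem_map_of_mem (f := Prod.fst) hq)
        rw [hq1, Bool.false_or]
        exact hfresh q (by simp [hq])),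
      PySem.Dict.items_insert_of_not_contains _ _ hpc]
    simp

-- ===== VERDICT (by name: the statement is the Claim_ definition above) =====
theorem pairs_create_spec : Claim_equal_pairs_create := by
  intro friends _hdom hpre
  obtain ⟨hnd, hcross⟩ := hpre
  have hfwd := pv_fwd_nodup (friends.map Prod.fst) hnd hcross
  have hrev := pv_rev_ok (friends.map Prod.fst) hnd hcross
  unfold Spec_pairs_create
  have hA : pairs_create friends
      = ((friends.map Prod.fst).foldl
          (fun pairs a => (friends.map Prod.fst).foldl
            (pvStepA (fun s => (PySem.Dict.mk friends).getD s "") a) pairs)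
          PySem.Dict.empty).items :=
    congrArg PySem.Dict.items
      (pv_foldl_enum_snd
        (fun pairs a => (friends.map Prod.fst).foldl
          (pvStepA (fun s => (PySem.Dict.mk friends).getD s "") a) pairs)
        (friends.map Prod.fst) 0 PySem.Dict.empty)
  have hk0 : (PySem.Dict.empty : PySem.Dict String String).keys
      = pvFK [] (friends.map Prod.fst) := by
    simp [pvFK]
  have h1 := pv_outerA (fun s => (PySem.Dict.mk friends).getD s "")
    (friends.map Prod.fst) [] (friends.map Prod.fst) PySem.Dict.empty rfl hnd ⟨hfwd, hrev⟩ hk0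
  have hB : pairs_create_alt friends
      = pvRows (fun s => (PySem.Dict.mk friends).getD s "") (friends.map Prod.fst) := by
    show (PySem.Dict.ofList _).items = _
    have hk : (PySem.Dict.mk friends).keys = friends.map Prod.fst := rfl
    rw [hk, show ((0 : Int)) = ((([] : List String).length : Nat) : Int) from rfl,
      pv_foldB (fun s => (PySem.Dict.mk friends).getD s "")
        (friends.map Prod.fst) [] (friends.map Prod.fst) [] rfl, List.nil_append]
    exact pv_ofList_items_of_nodup _ (by rw [pvRows_keys]; exact hfwd)
  rw [hA, h1, hB]
  simp [PySem.Dict.empty]
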